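-- pv_equiv track=rewrite | github.com/corcillo/ai | lab7/lab7.py | calculate_error_rates
-- ===== SOURCE A (Python) =====
-- def calculate_error_rates(point_to_weight, classifier_to_misclassified):
--     #A classifiers error rate is just the sum of the weights of the points they misclassify
--     """Given a dictionary mapping training points to their weights, and another
--     dictionary mapping classifiers to the training points they misclassify,
--     returns a dictionary mapping classifiers to their error rates."""
--     classToError = {}
--     for classifier in classifier_to_misclassified.keys():
--         errorSum = 0
--         for point in point_to_weight.keys():
--             if point in classifier_to_misclassified[classifier]:
--                 errorSum += point_to_weight[point]
--         classToError[classifier] = errorSum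
--     return classToError
-- ===== SOURCE B (Python) =====
-- def calculate_error_rates(point_to_weight, classifier_to_misclassified):
--     """Given a dictionary mapping training points to their weights, and another
--     dictionary mapping classifiers to the training points they misclassify,
--     returns a dictionary mapping classifiers to their error rates."""
--     error_rates = dict.fromkeys(classifier_to_misclassified, 0)
--     for classifier, misclassified in classifier_to_misclassified.items():
--         seen = set()
--         for point in misclassified:
--             if point not in seen:
--                 seen.add(point)
--                 error_rates[classifier] += point_to_weight.get(point, 0)
--     return error_rates
-- ===== Notes on version B (the rewrite author's own statement) =====
-- stated objective: faster
-- what changed: Instead of scanning all weighted points and testing membership in the misclassified list for every classifier, B pre-fills the result with zeros and makes one pass over each classifier's misclassified points, accumulating each distinct point's weight in place with a seen-set and a dict lookup.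
import Mathlib
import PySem

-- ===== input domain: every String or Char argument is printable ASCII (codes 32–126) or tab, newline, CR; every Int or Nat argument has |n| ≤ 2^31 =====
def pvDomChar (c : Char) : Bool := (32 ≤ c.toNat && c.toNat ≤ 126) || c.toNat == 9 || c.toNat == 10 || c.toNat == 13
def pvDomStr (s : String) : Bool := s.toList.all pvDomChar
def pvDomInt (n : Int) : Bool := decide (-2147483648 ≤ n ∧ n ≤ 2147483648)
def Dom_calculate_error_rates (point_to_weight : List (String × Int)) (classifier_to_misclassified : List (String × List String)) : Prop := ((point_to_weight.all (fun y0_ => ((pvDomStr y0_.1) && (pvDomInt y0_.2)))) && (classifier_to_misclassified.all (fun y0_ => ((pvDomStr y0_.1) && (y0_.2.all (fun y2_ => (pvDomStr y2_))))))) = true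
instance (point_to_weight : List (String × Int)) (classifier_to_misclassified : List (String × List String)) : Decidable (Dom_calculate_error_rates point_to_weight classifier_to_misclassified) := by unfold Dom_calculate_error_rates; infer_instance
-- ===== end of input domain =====

-- ===== PORT A =====

-- B replaces A's scan of ALL weighted points per classifier by a zero-initialized
-- result dict and one pass over each classifier's misclassified points, accumulating
-- distinct points' weights in place: an asymptotically faster exact re-implementation.

-- ===== PORT A =====
def calculate_error_rates (point_to_weight : List (String × Int)) (classifier_to_misclassified : List (String × List String)) : List (String × Int) :=
  let ptw := PySem.Dict.ofList point_to_weight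
  let ctm := PySem.Dict.ofList classifier_to_misclassified
  -- classToError = {}; for classifier in classifier_to_misclassified.keys(): …
  (ctm.keys.foldl (fun classToError classifier =>
      -- errorSum = 0; for point in point_to_weight.keys(): if point in … : errorSum += …
      let errorSum := ptw.keys.foldl (fun errorSum point =>
          if point ∈ ctm.getD classifier [] then errorSum + ptw.getD point 0 else errorSum) 0
      classToError.insert classifier errorSum) PySem.Dict.empty).items

-- ===== PORT B =====
def calculate_error_rates_alt (point_to_weight : List (String × Int)) (classifier_to_misclassified : List (String × List String)) : List (String × Int) :=
  let ptw := PySem.Dict.ofList point_to_weight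
  let ctm := PySem.Dict.ofList classifier_to_misclassified
  -- error_rates = dict.fromkeys(classifier_to_misclassified, 0)
  let init := ctm.keys.foldl (fun d k => d.insert k 0) PySem.Dict.empty
  -- for classifier, misclassified in …items(): seen = set(); for point in misclassified:
  --   if point not in seen: seen.add(point); error_rates[classifier] += point_to_weight.get(point, 0)
  (ctm.items.foldl (fun error_rates cm =>
      (cm.2.foldl (fun st point =>
          if PySem.Set.contains st.2 point then st
          else (st.1.modify cm.1 0 (· + ptw.getD point 0), PySem.Set.add st.2 point))
        (error_rates, PySem.Set.empty)).1)
    init).items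

-- ===== PRECONDITION & SPEC =====
def Spec_calculate_error_rates (point_to_weight : List (String × Int)) (classifier_to_misclassified : List (String × List String)) (out : List (String × Int)) : Prop := out = calculate_error_rates_alt point_to_weight classifier_to_misclassified
instance (point_to_weight : List (String × Int)) (classifier_to_misclassified : List (String × List String)) (out : List (String × Int)) : Decidable (Spec_calculate_error_rates point_to_weight classifier_to_misclassified out) := by unfold Spec_calculate_error_rates; infer_instance

-- ===== CLAIM (what is proved, stated in full; the proofs are below) =====
def Claim_equal_calculate_error_rates : Prop := ∀ (point_to_weight : List (String × Int)) (classifier_to_misclassified : List (String × List String)), Dom_calculate_error_rates point_to_weight classifier_to_misclassified → Spec_calculate_error_rates point_to_weight classifier_to_misclassified (calculate_error_rates point_to_weight classifier_to_misclassified)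

-- ===== LEMMAS AND PROOFS =====

-- pvW w pts seen = the value B's inner loop adds: Σ of w over the first occurrences in pts not already in seen.
def pvW (w : String → Int) : List String → PySem.Set String → Int
  | [], _ => 0
  | p :: ps, s => if PySem.Set.contains s p then pvW w ps s else w p + pvW w ps (PySem.Set.add s p)

-- pvS ptw L k = the total B adds to key k over the outer loop.
def pvS (w : String → Int) (L : List (String × List String)) (k : String) : Int :=
  ((L.filter (fun cm => cm.1 == k)).map (fun cm => pvW w cm.2 PySem.Set.empty)).sum

-- Inserting back a key's own current value is the identity (keys unique).
theorem insert_getD_self {κ ν : Type} [BEq κ] [LawfulBEq κ] (d : PySem.Dict κ ν) (k : κ) (d0 : ν)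
    (h : d.contains k = true) (hnd : d.keys.Nodup) : d.insert k (d.getD k d0) = d := by
  apply PySem.Dict.ext
  rw [PySem.Dict.items_insert_of_contains _ _ h]
  have hmap : ∀ p ∈ d.items, (if (p.1 == k) = true then (k, d.getD k d0) else p) = p := by
    intro p hp
    by_cases hk : p.1 = k
    · have hv : d.getD k d0 = p.2 := PySem.Dict.getD_of_mem_items d (by cases p; simp_all) hnd d0
      cases p; simp_all
    · simp [hk]
  calc List.map (fun p => if (p.1 == k) = true then (k, d.getD k d0) else p) d.items
      = List.map id d.items := List.map_congr_left hmap
    _ = d.items := List.map_id _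

-- Two modifies at the same key compose.
theorem modify_modify {κ ν : Type} [BEq κ] [LawfulBEq κ] (d : PySem.Dict κ ν) (k : κ) (d0 : ν)
    (f g : ν → ν) : (d.modify k d0 f).modify k d0 g = d.modify k d0 (fun v => g (f v)) := by
  simp [PySem.Dict.modify, PySem.Dict.getD_insert_self, PySem.Dict.insert_insert_self]

-- B's inner loop over one classifier's points is a single modify by pvW.
theorem inner_eq (ptw : PySem.Dict String Int) (c : String) :
    ∀ (pts : List String) (seen : PySem.Set String) (er : PySem.Dict String Int),
    c ∈ er.keys → er.keys.Nodup →
    (pts.foldl (fun st point =>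
        if PySem.Set.contains st.2 point then st
        else (st.1.modify c 0 (· + ptw.getD point 0), PySem.Set.add st.2 point))
      (er, seen)).1
      = er.modify c 0 (· + pvW (fun p => ptw.getD p 0) pts seen) := by
  intro pts
  induction pts with
  | nil =>
    intro seen er hc hnd
    simp only [List.foldl_nil, pvW]
    have h0 : er.modify c 0 (· + 0) = er.insert c (er.getD c 0) := by
      simp [PySem.Dict.modify]
    rw [h0, insert_getD_self er c 0 (by rw [PySem.Dict.contains_iff_mem_keys]; exact hc) hnd]
  | cons p ps ih =>
    intro seen er hc hnd
    simp only [List.foldl_cons, pvW]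
    by_cases hp : PySem.Set.contains seen p = true
    · simp only [hp, if_true]
      exact ih seen er hc hnd
    · have hp' : PySem.Set.contains seen p = false := by simpa using hp
      simp only [hp', if_false, Bool.false_eq_true]
      rw [ih (PySem.Set.add seen p) (er.modify c 0 (· + ptw.getD p 0))
          (by rw [PySem.Dict.keys_modify, PySem.Dict.mem_keys_insert]; left; rfl)
          (by rw [PySem.Dict.keys_modify]; exact PySem.Dict.nodup_keys_insert _ _ _ hnd),
        modify_modify]
      congr 1
      funext v
      ring

-- B's outer loop: keys are preserved and each key k gains exactly pvS … k.
theorem outer_eq (ptw : PySem.Dict String Int) :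
    ∀ (L : List (String × List String)) (er : PySem.Dict String Int),
    (∀ cm ∈ L, cm.1 ∈ er.keys) → er.keys.Nodup →
    (L.foldl (fun error_rates cm =>
        (cm.2.foldl (fun st point =>
            if PySem.Set.contains st.2 point then st
            else (st.1.modify cm.1 0 (· + ptw.getD point 0), PySem.Set.add st.2 point))
          (error_rates, PySem.Set.empty)).1) er).keys = er.keys ∧
    ∀ k, (L.foldl (fun error_rates cm =>
        (cm.2.foldl (fun st point =>
            if PySem.Set.contains st.2 point then st
            else (st.1.modify cm.1 0 (· + ptw.getD point 0), PySem.Set.add st.2 point))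
          (error_rates, PySem.Set.empty)).1) er).getD k 0
      = er.getD k 0 + pvS (fun p => ptw.getD p 0) L k := by
  intro L
  induction L with
  | nil => intro er _ _; exact ⟨rfl, fun k => by simp [pvS]⟩
  | cons cm L ih =>
    intro er hmem hnd
    have hc : cm.1 ∈ er.keys := hmem cm (by simp)
    have hcont : er.contains cm.1 = true := by rw [PySem.Dict.contains_iff_mem_keys]; exact hc
    simp only [List.foldl_cons]
    rw [inner_eq ptw cm.1 cm.2 PySem.Set.empty er hc hnd]
    have hkeys : (er.modify cm.1 0 (· + pvW (fun p => ptw.getD p 0) cm.2 PySem.Set.empty)).keys = er.keys := by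
      rw [PySem.Dict.keys_modify, PySem.Dict.keys_insert_of_contains _ _ hcont]
    obtain ⟨ihk, ihg⟩ := ih (er.modify cm.1 0 (· + pvW (fun p => ptw.getD p 0) cm.2 PySem.Set.empty))
      (by rw [hkeys]; exact fun c h => hmem c (by simp [h])) (by rw [hkeys]; exact hnd)
    refine ⟨by rw [ihk, hkeys], fun k => ?_⟩
    rw [ihg k, PySem.Dict.getD_modify]
    by_cases hk : k = cm.1
    · subst hk
      rw [if_pos rfl]
      simp only [pvS, List.filter_cons, beq_self_eq_true, if_true, List.map_cons, List.sum_cons]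
      ring
    · rw [if_neg hk]
      have hne : (cm.1 == k) = false := by
        simp only [beq_eq_false_iff_ne, ne_eq]; exact fun h => hk h.symm
      simp only [pvS, List.filter_cons, hne, Bool.false_eq_true, if_false]

-- A's inner loop is the sum of the weights of the keys lying in `pts`.
theorem foldl_if_add_eq_sum_filter (l : List String) (pts : List String) (f : String → Int) (s : Int) :
    l.foldl (fun acc p => if p ∈ pts then acc + f p else acc) s
      = s + ((l.filter (fun p => decide (p ∈ pts))).map f).sum := by
  induction l generalizing s with
  | nil => simp
  | cons x xs ih =>
    by_cases hx : x ∈ pts <;> simp [hx, ih, add_assoc]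

-- pvW sums the weights over the points of pts not in seen, as a Finset sum.
theorem pvW_eq_sum (w : String → Int) :
    ∀ (pts : List String) (seen : PySem.Set String),
    pvW w pts seen = ∑ p ∈ pts.toFinset \ seen.toFinset, w p := by
  intro pts
  induction pts with
  | nil => intro seen; simp [pvW]
  | cons p ps ih =>
    intro seen
    by_cases hp : p ∈ seen
    · have hc : PySem.Set.contains seen p = true := (PySem.Set.contains_iff seen p).mpr hp
      rw [pvW, if_pos hc, ih seen]
      congr 1
      apply Finset.ext
      intro x
      simp only [List.toFinset_cons, Finset.mem_sdiff, Finset.mem_insert, List.mem_toFinset]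
      constructor
      · rintro ⟨hx, hns⟩; exact ⟨Or.inr hx, hns⟩
      · rintro ⟨rfl | hx, hns⟩
        · exact (hns hp).elim
        · exact ⟨hx, hns⟩
    · have hc : PySem.Set.contains seen p = false := by
        rcases h : PySem.Set.contains seen p with _ | _
        · rfl
        · exact absurd ((PySem.Set.contains_iff seen p).mp h) hp
      have hadd : (PySem.Set.add seen p).toFinset = insert p seen.toFinset := by
        apply Finset.ext
        intro x
        simp only [List.mem_toFinset, Finset.mem_insert, PySem.Set.mem_add]
        tauto
      rw [pvW, if_neg (by rw [hc]; simp), ih (PySem.Set.add seen p), hadd]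
      have h1 : (p :: ps).toFinset \ seen.toFinset = insert p (ps.toFinset \ seen.toFinset) := by
        apply Finset.ext; intro x
        simp only [List.toFinset_cons, Finset.mem_sdiff, Finset.mem_insert, List.mem_toFinset]
        constructor
        · rintro ⟨rfl | hx, hns⟩
          · exact Or.inl rfl
          · exact Or.inr ⟨hx, hns⟩
        · rintro (rfl | ⟨hx, hns⟩)
          · exact ⟨Or.inl rfl, hp⟩
          · exact ⟨Or.inr hx, hns⟩
      have h2 : ps.toFinset \ insert p seen.toFinset = (ps.toFinset \ seen.toFinset).erase p := by
        apply Finset.ext; intro x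
        simp only [Finset.mem_sdiff, Finset.mem_insert, Finset.mem_erase, List.mem_toFinset]
        tauto
      have h3 : insert p ((ps.toFinset \ seen.toFinset).erase p)
          = insert p (ps.toFinset \ seen.toFinset) := by
        apply Finset.ext; intro x
        simp only [Finset.mem_insert, Finset.mem_erase]
        tauto
      rw [h1, h2, ← h3, Finset.sum_insert (Finset.notMem_erase _ _)]

-- A's per-classifier value equals B's pvW over the same point list.
theorem per_classifier_eq (d : PySem.Dict String Int) (hnd : d.keys.Nodup) (pts : List String) :
    d.keys.foldl (fun acc p => if p ∈ pts then acc + d.getD p 0 else acc) 0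
      = pvW (fun p => d.getD p 0) pts PySem.Set.empty := by
  rw [foldl_if_add_eq_sum_filter, zero_add, pvW_eq_sum]
  have hsub : (d.keys.filter (fun p => decide (p ∈ pts))).toFinset ⊆ pts.toFinset \ (PySem.Set.empty : PySem.Set String).toFinset := by
    intro x hx
    simp only [List.mem_toFinset, List.mem_filter, decide_eq_true_eq] at hx
    simp [PySem.Set.empty, hx.2]
  rw [← List.sum_toFinset _ (hnd.filter _)]
  refine Finset.sum_subset hsub ?_
  intro x hx hnx
  simp only [Finset.mem_sdiff, List.mem_toFinset] at hx
  simp only [List.mem_toFinset, List.mem_filter, decide_eq_true_eq] at hnx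
  have hxk : x ∉ d.keys := fun h => hnx ⟨h, hx.1⟩
  exact PySem.Dict.getD_of_not_contains d 0 (by rw [PySem.Dict.contains_eq_decide_mem_keys]; simp [hxk])

-- In a list with unique keys, filtering by a present key gives exactly its entry.
theorem filter_key_singleton {β : Type} :
    ∀ (L : List (String × β)) (c : String) (v : β), (L.map Prod.fst).Nodup → (c, v) ∈ L →
    L.filter (fun cm => cm.1 == c) = [(c, v)] := by
  intro L
  induction L with
  | nil => intro c v _ h; cases h
  | cons cm L ih =>
    intro c v hnd hmem
    simp only [List.map_cons, List.nodup_cons] at hnd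
    rcases List.mem_cons.mp hmem with rfl | hmem'
    · simp only [List.filter_cons, beq_self_eq_true, if_true]
      congr 1
      apply List.filter_eq_nil_iff.mpr
      intro p hp hpc
      exact hnd.1 (List.mem_map.mpr ⟨p, hp, by simpa using hpc⟩)
    · have hne : (cm.1 == c) = false := by
        simp only [beq_eq_false_iff_ne, ne_eq]
        intro h
        exact hnd.1 (h ▸ List.mem_map_of_mem (f := Prod.fst) hmem')
      simp only [List.filter_cons, hne, Bool.false_eq_true, if_false]
      exact ih c v hnd.2 hmem'

theorem calculate_error_rates_eq (point_to_weight : List (String × Int)) (classifier_to_misclassified : List (String × List String)) :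
    calculate_error_rates point_to_weight classifier_to_misclassified
      = calculate_error_rates_alt point_to_weight classifier_to_misclassified := by
  unfold calculate_error_rates calculate_error_rates_alt
  simp only []
  set ptw := PySem.Dict.ofList point_to_weight with hptw
  set ctm := PySem.Dict.ofList classifier_to_misclassified with hctm
  have hndc : ctm.keys.Nodup := PySem.Dict.nodup_keys_ofList _
  have hndp : ptw.keys.Nodup := PySem.Dict.nodup_keys_ofList _
  -- A's dict: a fresh-key insert loop over ctm.keys.
  have hA : (ctm.keys.foldl (fun classToError classifier =>
        classToError.insert classifier
          (ptw.keys.foldl (fun errorSum point =>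
            if point ∈ ctm.getD classifier [] then errorSum + ptw.getD point 0 else errorSum) 0))
        PySem.Dict.empty).items
      = ctm.keys.map (fun c => (c, ptw.keys.foldl (fun errorSum point =>
            if point ∈ ctm.getD c [] then errorSum + ptw.getD point 0 else errorSum) 0)) := by
    have h := PySem.Dict.items_foldl_insert_fresh ctm.keys (fun c => c)
      (fun c => ptw.keys.foldl (fun errorSum point =>
        if point ∈ ctm.getD c [] then errorSum + ptw.getD point 0 else errorSum) 0)
      PySem.Dict.empty (fun a _ => PySem.Dict.contains_empty a) (by simpa using hndc)
    simpa [Function.comp_def] using h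
  -- B's init dict: zeros on the same keys.
  have hI : (ctm.keys.foldl (fun d k => d.insert k (0 : Int)) PySem.Dict.empty).items
      = ctm.keys.map (fun k => (k, (0 : Int))) := by
    have h := PySem.Dict.items_foldl_insert_fresh ctm.keys (fun c => c) (fun _ => (0 : Int))
      PySem.Dict.empty (fun a _ => PySem.Dict.contains_empty a) (by simpa using hndc)
    simpa [Function.comp_def] using h
  set init := ctm.keys.foldl (fun d k => d.insert k (0 : Int)) PySem.Dict.empty with hinit
  have hIkeys : init.keys = ctm.keys := by
    have h : init.keys = (List.map (fun k => (k, (0 : Int))) ctm.keys).map (fun p => p.1) := by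
      rw [← hI]; rfl
    simpa [Function.comp_def] using h
  obtain ⟨hBkeys, hBgetD⟩ := outer_eq ptw ctm.items init
    (fun cm hcm => by rw [hIkeys]; exact List.mem_map_of_mem hcm)
    (by rw [hIkeys]; exact hndc)
  rw [hA]
  rw [PySem.Dict.items_eq_map_keys _ (by rw [hBkeys, hIkeys]; exact hndc) 0]
  rw [hBkeys, hIkeys]
  apply List.map_congr_left
  intro c hc
  rw [hBgetD c]
  have hinitgetD : init.getD c 0 = 0 := by
    refine PySem.Dict.getD_of_mem_items init (k := c) (v := 0) ?_ (by rw [hIkeys]; exact hndc) 0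
    rw [hI]
    exact List.mem_map_of_mem hc
  have hcv : (c, ctm.getD c []) ∈ ctm.items := by
    rcases h : ctm.get? c with _ | v
    · exact absurd ((PySem.Dict.get?_eq_none_iff_not_mem_keys ctm c).mp h) (by simpa using hc)
    · have hm := PySem.Dict.mem_items_of_get?_eq_some ctm h
      rwa [PySem.Dict.getD_eq_get?_getD, h]
  have hfilter : ctm.items.filter (fun cm => cm.1 == c) = [(c, ctm.getD c [])] :=
    filter_key_singleton ctm.items c (ctm.getD c []) hndc hcv
  simp only [pvS, hfilter, List.map_cons, List.map_nil, List.sum_cons, List.sum_nil, add_zero]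
  rw [hinitgetD, zero_add, per_classifier_eq ptw hndp]

-- ===== VERDICT (by name: the statement is the Claim_ definition above) =====
theorem calculate_error_rates_spec : Claim_equal_calculate_error_rates := by
  intro ptw ctm _
  exact calculate_error_rates_eq ptw ctm
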